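-- pv_equiv track=rewrite | github.com/Filiphatter/AdventofCode | yr2015/day5/part2.py | hasPairTwice
-- ===== SOURCE A (Python) =====
-- def hasPairTwice(text):
--     pairs = {}
--
--     for i in range(len(text) - 1):
--         pair = text[i:i+2] #finding pair
--         if pair in pairs:
--             if i - pairs[pair] >= 2:  # non-overlapping pairs
--                 return True
--         else:
--             pairs[pair] = i
--
--     return False
-- ===== SOURCE B (Python) =====
-- def hasPairTwice(text):
--     return any(text[i:i+2] in text[i+2:] for i in range(len(text) - 1))
-- ===== Notes on version B (the rewrite author's own statement) =====
-- stated objective: simpler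
-- what changed: The dict recording each pair's first index is replaced by a one-line any() that, for each position, searches the remaining suffix text[i+2:] for the pair by substring search.
import Mathlib
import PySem

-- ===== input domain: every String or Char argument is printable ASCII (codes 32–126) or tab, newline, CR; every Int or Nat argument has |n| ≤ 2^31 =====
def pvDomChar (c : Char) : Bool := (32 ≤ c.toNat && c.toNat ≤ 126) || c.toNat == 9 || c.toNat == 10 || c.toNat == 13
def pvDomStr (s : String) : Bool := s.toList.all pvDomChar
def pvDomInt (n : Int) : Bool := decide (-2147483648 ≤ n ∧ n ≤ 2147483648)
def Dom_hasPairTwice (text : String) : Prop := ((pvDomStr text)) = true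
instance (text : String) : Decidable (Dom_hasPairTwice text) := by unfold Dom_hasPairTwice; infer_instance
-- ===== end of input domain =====

-- B replaces A's first-occurrence dict by a per-position substring search of the remaining suffix (simpler, one line).


-- ===== PORT A =====
-- the 'for i in range(len(text)-1)' loop with early return, carrying the dict 'pairs'
def pvALoop (s : List Char) : PySem.Dict (List Char) Int → List Int → Bool
  | _, [] => false
  | pairs, i :: rest =>
    let pair := PySem.List.slice s (some i) (some (i + 2))   -- text[i:i+2]
    if pairs.contains pair then
      if 2 ≤ i - pairs.getD pair 0 then true   -- i - pairs[pair] >= 2 (lookup guarded by 'pair in pairs')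
      else pvALoop s pairs rest
    else pvALoop s (pairs.insert pair i) rest

def hasPairTwice (text : String) : Bool :=
  pvALoop text.toList PySem.Dict.empty
    (PySem.List.pyRange 0 ((PySem.Str.len text : Int) - 1) 1)

-- ===== PORT B =====
-- any(text[i:i+2] in text[i+2:] for i in range(len(text)-1))
def hasPairTwice_alt (text : String) : Bool :=
  (PySem.List.pyRange 0 ((PySem.Str.len text : Int) - 1) 1).any (fun i =>
    PySem.Chars.isIn (PySem.List.slice text.toList (some i) (some (i + 2)))
      (PySem.List.slice text.toList (some (i + 2)) none))

-- ===== PRECONDITION & SPEC =====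
def Spec_hasPairTwice (text : String) (out : Bool) : Prop := out = hasPairTwice_alt text
instance (text : String) (out : Bool) : Decidable (Spec_hasPairTwice text out) := by unfold Spec_hasPairTwice; infer_instance

-- ===== CLAIM (what is proved, stated in full; the proofs are below) =====
def Claim_equal_hasPairTwice : Prop := ∀ (text : String), Dom_hasPairTwice text → Spec_hasPairTwice text (hasPairTwice text)

-- ===== LEMMAS AND PROOFS =====

-- the pair of characters starting at position k
def pvPairAt (s : List Char) (k : Nat) : List Char := (s.drop k).take 2

-- the common characterisation: some pair repeats at distance ≥ 2
def pvRepeats (s : List Char) : Prop :=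
  ∃ i j : Nat, j + 2 ≤ s.length ∧ i + 2 ≤ j ∧ pvPairAt s i = pvPairAt s j

lemma pvSlice_pairAt (s : List Char) (k : Nat) :
    PySem.List.slice s (some (k : Int)) (some ((k : Int) + 2)) = pvPairAt s k := by
  simpa [pvPairAt] using PySem.List.slice_natCast_add s k 2

lemma pvLen_pairAt (s : List Char) (k : Nat) (h : k + 2 ≤ s.length) :
    (pvPairAt s k).length = 2 := by
  simp [pvPairAt]; omega

lemma pvFirst (s : List Char) (pr : List Char) (m : Nat)
    (hex : ∃ k, k < m ∧ pvPairAt s k = pr) :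
    ∃ k, k < m ∧ pvPairAt s k = pr ∧ ∀ k' < k, pvPairAt s k' ≠ pr := by
  refine ⟨Nat.find hex, (Nat.find_spec hex).1, (Nat.find_spec hex).2, ?_⟩
  intro k' hk' hc
  exact Nat.find_min hex hk' ⟨lt_trans hk' (Nat.find_spec hex).1, hc⟩

lemma pvShift (s : List Char) (m : Nat)
    (hnot : ∀ i, i + 2 ≤ m → pvPairAt s i ≠ pvPairAt s m) :
    ((∃ i j : Nat, m + 1 ≤ j ∧ j + 2 ≤ s.length ∧ i + 2 ≤ j ∧ pvPairAt s i = pvPairAt s j) ↔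
     (∃ i j : Nat, m ≤ j ∧ j + 2 ≤ s.length ∧ i + 2 ≤ j ∧ pvPairAt s i = pvPairAt s j)) := by
  constructor
  · rintro ⟨i, j, h1, h2, h3, h4⟩; exact ⟨i, j, by omega, h2, h3, h4⟩
  · rintro ⟨i, j, h1, h2, h3, h4⟩
    rcases eq_or_lt_of_le h1 with rfl | h
    · exact absurd h4 (hnot i h3)
    · exact ⟨i, j, by omega, h2, h3, h4⟩

lemma pvALoop_iff (s : List Char) :
    ∀ (t m : Nat) (d : PySem.Dict (List Char) Int),
    s.length - 1 - m = t →
    (∀ pr q, d.get? pr = some q ↔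
      ∃ k : Nat, q = (k : Int) ∧ k < m ∧ pvPairAt s k = pr ∧ ∀ k' < k, pvPairAt s k' ≠ pr) →
    (pvALoop s d (PySem.List.pyRange (m : Int) ((s.length : Int) - 1) 1) = true ↔
      ∃ i j : Nat, m ≤ j ∧ j + 2 ≤ s.length ∧ i + 2 ≤ j ∧ pvPairAt s i = pvPairAt s j) := by
  intro t
  induction t with
  | zero =>
    intro m d hlen hd
    rw [PySem.List.pyRange_one_eq_nil (by omega)]
    simp only [pvALoop, Bool.false_eq_true, false_iff]
    rintro ⟨i, j, h1, h2, h3, h4⟩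
    omega
  | succ t IH =>
    intro m d hlen hd
    have hm2 : m + 2 ≤ s.length := by omega
    rw [PySem.List.pyRange_one_cons (by omega : (m : Int) < (s.length : Int) - 1)]
    simp only [pvALoop]
    rw [pvSlice_pairAt]
    have hcast : (m : Int) + 1 = ((m + 1 : Nat) : Int) := by push_cast; ring
    rcases hget : d.get? (pvPairAt s m) with _ | q
    · -- pair not yet seen: insert it
      rw [PySem.Dict.contains_eq_isSome_get?, hget]
      simp only [Option.isSome_none, Bool.false_eq_true, if_false]
      have hnone : ∀ k < m, pvPairAt s k ≠ pvPairAt s m := by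
        intro k hk hc
        obtain ⟨k0, hk0m, hk0eq, hk0min⟩ := pvFirst s (pvPairAt s m) m ⟨k, hk, hc⟩
        have := (hd (pvPairAt s m) (k0 : Int)).mpr ⟨k0, rfl, hk0m, hk0eq, hk0min⟩
        rw [hget] at this; simp at this
      have hd' : ∀ pr q, (d.insert (pvPairAt s m) (m : Int)).get? pr = some q ↔
          ∃ k : Nat, q = (k : Int) ∧ k < m + 1 ∧ pvPairAt s k = pr ∧
            ∀ k' < k, pvPairAt s k' ≠ pr := by
        intro pr q
        by_cases hpr : pr = pvPairAt s m
        · subst hpr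
          rw [PySem.Dict.get?_insert_self]
          constructor
          · rintro h
            injection h with h
            exact ⟨m, h.symm, by omega, rfl, hnone⟩
          · rintro ⟨k, rfl, hk, hkeq, hkmin⟩
            rcases Nat.lt_or_ge k m with hlt | hge
            · exact absurd hkeq (hnone k hlt)
            · have : k = m := by omega
              subst this; rfl
        · rw [PySem.Dict.get?_insert_of_ne _ _ hpr, hd pr q]
          constructor
          · rintro ⟨k, rfl, hk, hkeq, hkmin⟩
            exact ⟨k, rfl, by omega, hkeq, hkmin⟩
          · rintro ⟨k, rfl, hk, hkeq, hkmin⟩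
            have : k ≠ m := by rintro rfl; exact hpr hkeq.symm
            exact ⟨k, rfl, by omega, hkeq, hkmin⟩
      rw [hcast, IH (m + 1) _ (by omega) hd']
      exact pvShift s m (fun i hi => hnone i (by omega))
    · -- pair seen before at its first occurrence q
      obtain ⟨k, rfl, hkm, hkeq, hkmin⟩ := (hd _ q).mp hget
      rw [PySem.Dict.contains_eq_isSome_get?, hget]
      simp only [Option.isSome_some, if_true]
      rw [PySem.Dict.getD_of_get?_eq_some _ 0 hget]
      by_cases hge : 2 ≤ (m : Int) - (k : Int)
      · rw [if_pos hge]
        simp only [true_iff]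
        exact ⟨k, m, le_refl m, hm2, by omega, hkeq⟩
      · rw [if_neg hge]
        have hd' : ∀ pr q, d.get? pr = some q ↔
            ∃ k : Nat, q = (k : Int) ∧ k < m + 1 ∧ pvPairAt s k = pr ∧
              ∀ k' < k, pvPairAt s k' ≠ pr := by
          intro pr q
          rw [hd pr q]
          constructor
          · rintro ⟨k', rfl, hk', h1, h2⟩
            exact ⟨k', rfl, by omega, h1, h2⟩
          · rintro ⟨k', rfl, hk', h1, h2⟩
            rcases Nat.lt_or_ge k' m with hlt | hge'
            · exact ⟨k', rfl, hlt, h1, h2⟩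
            · have : k' = m := by omega
              subst this
              exact (h2 k hkm (hkeq.trans h1)).elim
        rw [hcast, IH (m + 1) _ (by omega) hd']
        apply pvShift
        intro i hi hc
        rcases Nat.lt_or_ge i k with hlt | hge'
        · exact hkmin i hlt hc
        · omega

lemma pvA_iff (text : String) : hasPairTwice text = true ↔ pvRepeats text.toList := by
  unfold hasPairTwice
  rw [PySem.Str.len_eq]
  have hd : ∀ pr q, (PySem.Dict.empty : PySem.Dict (List Char) Int).get? pr = some q ↔
      ∃ k : Nat, q = (k : Int) ∧ k < 0 ∧ pvPairAt text.toList k = pr ∧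
        ∀ k' < k, pvPairAt text.toList k' ≠ pr := by
    intro pr q
    simp [PySem.Dict.get?_empty]
  have h := pvALoop_iff text.toList (text.toList.length - 1) 0 PySem.Dict.empty (by omega) hd
  simp only [Nat.cast_zero] at h
  rw [h]
  unfold pvRepeats
  constructor
  · rintro ⟨i, j, _, h2, h3, h4⟩; exact ⟨i, j, h2, h3, h4⟩
  · rintro ⟨i, j, h2, h3, h4⟩; exact ⟨i, j, by omega, h2, h3, h4⟩

lemma pvB_iff (text : String) : hasPairTwice_alt text = true ↔ pvRepeats text.toList := by
  unfold hasPairTwice_alt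
  rw [List.any_eq_true, PySem.Str.len_eq]
  constructor
  · rintro ⟨x, hx, hf⟩
    rw [PySem.List.mem_pyRange_one] at hx
    obtain ⟨k, rfl⟩ : ∃ k : Nat, x = (k : Int) := ⟨x.toNat, (Int.toNat_of_nonneg hx.1).symm⟩
    have hk2 : k + 2 ≤ text.toList.length := by omega
    rw [pvSlice_pairAt,
      (show ((k : Int) + 2) = ((k + 2 : Nat) : Int) by norm_cast),
      PySem.List.slice_from_natCast,
      ← PySem.Chars.exists_prefix_drop_iff_isIn] at hf
    obtain ⟨j, hpre⟩ := hf
    rw [List.drop_drop] at hpre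
    have hsub := List.prefix_iff_eq_take.mp hpre
    rw [pvLen_pairAt _ k hk2] at hsub
    have hlen2 : (k + 2 + j) + 2 ≤ text.toList.length := by
      have h2 := congrArg List.length hsub
      rw [pvLen_pairAt _ k hk2, List.length_take, List.length_drop] at h2
      omega
    exact ⟨k, k + 2 + j, hlen2, by omega, hsub⟩
  · rintro ⟨i, j, hj2, hij, heq⟩
    refine ⟨(i : Int), ?_, ?_⟩
    · rw [PySem.List.mem_pyRange_one]
      constructor
      · exact_mod_cast Nat.zero_le i
      · have : i + 1 < text.toList.length := by omega
        omega
    · rw [pvSlice_pairAt,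
        (show ((i : Int) + 2) = ((i + 2 : Nat) : Int) by norm_cast),
        PySem.List.slice_from_natCast,
        ← PySem.Chars.exists_prefix_drop_iff_isIn]
      refine ⟨j - (i + 2), ?_⟩
      rw [List.drop_drop, (show i + 2 + (j - (i + 2)) = j by omega), heq]
      exact List.take_prefix 2 _

-- ===== VERDICT (by name: the statement is the Claim_ definition above) =====
theorem hasPairTwice_spec : Claim_equal_hasPairTwice := by
  intro text _
  unfold Spec_hasPairTwice
  rw [Bool.eq_iff_iff, pvA_iff, pvB_iff]
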